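-- pv_equiv track=rewrite | github.com/arham6606/PasswordStrengthChecker-GUI- | checker/complexity.py | give_suggestions
-- ===== SOURCE A (Python) =====
-- def give_suggestions(password):
--     """Tell the user how to make their password stronger."""
--     special_chars = '!@#$%^&*()_-+=[]{}|\\:;"\'<>,.?/'
--
--     #this is dictonary with elements and those elemnets inside them have 2 more elements known as check and message
--     check_lists = {
--         'uppercase': {
--             'check': lambda p: any(c.isupper() for c in p),
--             'message': "Add uppercase letters (A–Z)"
--         },
--         'lowercase': {
--             'check': lambda p: any(c.islower() for c in p),
--             'message': "Add lowercase letters (a–z)"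
--         },
--         'digit': {
--             'check': lambda p: any(c.isdigit() for c in p),
--             'message': "Add digits (0–9)"
--         },
--         'special': {
--             'check': lambda p: any(c in special_chars for c in p),
--             'message': f"Add special characters ({special_chars})"
--         }
--     }
--
--     missing = [req['message'] for req in check_lists.values() if not req['check'](password)]
--
--     if not missing:
--         return [" Password meets all checks!"]
--     return missing
-- ===== SOURCE B (Python) =====
-- def give_suggestions(password):
--     """Tell the user how to make their password stronger."""
--     special_chars = '!@#$%^&*()_-+=[]{}|\\:;"\'<>,.?/'
--     has_upper = has_lower = has_digit = has_special = False
--     for c in password: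
--         if c.isupper():
--             has_upper = True
--         if c.islower():
--             has_lower = True
--         if c.isdigit():
--             has_digit = True
--         if c in special_chars:
--             has_special = True
--     missing = []
--     if not has_upper:
--         missing.append("Add uppercase letters (A–Z)")
--     if not has_lower:
--         missing.append("Add lowercase letters (a–z)")
--     if not has_digit:
--         missing.append("Add digits (0–9)")
--     if not has_special:
--         missing.append(f"Add special characters ({special_chars})")
--     if not missing:
--         return [" Password meets all checks!"]
--     return missing
-- ===== Notes on version B (the rewrite author's own statement) =====
-- stated objective: simpler
-- what changed: Replaced the dict of lambda checks and four separate any() scans over the password by one single pass maintaining four booleans, then building the missing list from the flags in the same fixed order.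
import Mathlib
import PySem

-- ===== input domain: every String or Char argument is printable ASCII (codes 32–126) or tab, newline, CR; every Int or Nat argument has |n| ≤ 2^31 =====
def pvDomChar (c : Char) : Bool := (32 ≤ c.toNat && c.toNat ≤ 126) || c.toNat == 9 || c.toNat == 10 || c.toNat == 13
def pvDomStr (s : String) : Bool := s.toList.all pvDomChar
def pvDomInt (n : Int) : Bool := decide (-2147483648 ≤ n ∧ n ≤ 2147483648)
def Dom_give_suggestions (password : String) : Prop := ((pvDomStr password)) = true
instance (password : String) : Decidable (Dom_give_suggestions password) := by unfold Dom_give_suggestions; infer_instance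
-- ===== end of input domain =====

-- B replaces A's dict of lambda checks and four any() scans by one pass keeping four booleans (objective: simpler).


-- ===== PORT A =====
-- the special_chars literal (shared constant of both Pythons)
def pvSpecial : List Char := "!@#$%^&*()_-+=[]{}|\\:;\"'<>,.?/".toList

-- literal port of A: a list of (check, message) pairs in dict order, a comprehension
-- keeping the messages of the failing checks, then the empty-list fallback
def give_suggestions (password : String) : List String :=
  let p := password.toList
  let check_lists : List ((List Char → Bool) × String) :=
    [ (fun q => q.any PySem.Chars.isupper, "Add uppercase letters (A–Z)"),
      (fun q => q.any PySem.Chars.islower, "Add lowercase letters (a–z)"),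
      (fun q => q.any PySem.Chars.isdigit, "Add digits (0–9)"),
      (fun q => q.any (fun c => decide (c ∈ pvSpecial)),
        "Add special characters (" ++ String.ofList pvSpecial ++ ")") ]
  let missing := (check_lists.filter (fun req => !(req.1 p))).map (·.2)
  if missing = [] then [" Password meets all checks!"] else missing

-- ===== PORT B =====
-- port of B: one fold over the characters maintaining four booleans, then the
-- missing list is assembled from the flags in the fixed order
def give_suggestions_alt (password : String) : List String :=
  let st := password.toList.foldl
    (fun (st : Bool × Bool × Bool × Bool) c =>
      (st.1 || PySem.Chars.isupper c,
       st.2.1 || PySem.Chars.islower c,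
       st.2.2.1 || PySem.Chars.isdigit c,
       st.2.2.2 || decide (c ∈ pvSpecial)))
    (false, false, false, false)
  let missing :=
    (if st.1 then [] else ["Add uppercase letters (A–Z)"]) ++
    (if st.2.1 then [] else ["Add lowercase letters (a–z)"]) ++
    (if st.2.2.1 then [] else ["Add digits (0–9)"]) ++
    (if st.2.2.2 then []
     else ["Add special characters (" ++ String.ofList pvSpecial ++ ")"])
  if missing = [] then [" Password meets all checks!"] else missing

-- ===== PRECONDITION & SPEC =====
def Spec_give_suggestions (password : String) (out : List String) : Prop := out = give_suggestions_alt password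
instance (password : String) (out : List String) : Decidable (Spec_give_suggestions password out) := by unfold Spec_give_suggestions; infer_instance

-- ===== CLAIM (what is proved, stated in full; the proofs are below) =====
def Claim_equal_give_suggestions : Prop := ∀ (password : String), Dom_give_suggestions password → Spec_give_suggestions password (give_suggestions password)

-- ===== LEMMAS AND PROOFS =====

-- the four-flag fold computes the four any's at once
theorem pvFold4 (l : List Char) (a b c d : Bool) :
    l.foldl
      (fun (st : Bool × Bool × Bool × Bool) ch =>
        (st.1 || PySem.Chars.isupper ch,
         st.2.1 || PySem.Chars.islower ch,
         st.2.2.1 || PySem.Chars.isdigit ch,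
         st.2.2.2 || decide (ch ∈ pvSpecial)))
      (a, b, c, d)
    = (a || l.any PySem.Chars.isupper,
       b || l.any PySem.Chars.islower,
       c || l.any PySem.Chars.isdigit,
       d || l.any (fun ch => decide (ch ∈ pvSpecial))) := by
  induction l generalizing a b c d with
  | nil => simp
  | cons x xs ih => simp [List.foldl_cons, ih, Bool.or_assoc]

-- ===== VERDICT (by name: the statement is the Claim_ definition above) =====
theorem give_suggestions_spec : Claim_equal_give_suggestions := by
  intro password _
  show give_suggestions password = give_suggestions_alt password
  unfold give_suggestions give_suggestions_alt
  rw [pvFold4]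
  cases ha : (password.toList.any PySem.Chars.isupper) <;>
  cases hb : (password.toList.any PySem.Chars.islower) <;>
  cases hc : (password.toList.any PySem.Chars.isdigit) <;>
  cases hd : (password.toList.any (fun ch => decide (ch ∈ pvSpecial))) <;>
    simp [List.filter, List.map, ha, hb, hc, hd]
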